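-- pv_equiv track=rewrite | github.com/biosvos/algorithm | 프로그래머스/예상 대진표/main.py | solution
-- ===== SOURCE A (Python) =====
-- def solution(n, a, b):
--     a -= 1
--     b -= 1
--     cnt = 0
--     while a != b:
--         a //= 2
--         b //= 2
--         cnt += 1
--
--     return cnt
-- ===== SOURCE B (Python) =====
-- def solution(n, a, b):
--     return ((a - 1) ^ (b - 1)).bit_length()
-- ===== Notes on version B (the rewrite author's own statement) =====
-- stated objective: idiomatic
-- what changed: Replaces the 'halve both positions until equal' while-loop with a closed-form bit computation: the round where a and b meet is the bit length of (a-1) XOR (b-1).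
import Mathlib
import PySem

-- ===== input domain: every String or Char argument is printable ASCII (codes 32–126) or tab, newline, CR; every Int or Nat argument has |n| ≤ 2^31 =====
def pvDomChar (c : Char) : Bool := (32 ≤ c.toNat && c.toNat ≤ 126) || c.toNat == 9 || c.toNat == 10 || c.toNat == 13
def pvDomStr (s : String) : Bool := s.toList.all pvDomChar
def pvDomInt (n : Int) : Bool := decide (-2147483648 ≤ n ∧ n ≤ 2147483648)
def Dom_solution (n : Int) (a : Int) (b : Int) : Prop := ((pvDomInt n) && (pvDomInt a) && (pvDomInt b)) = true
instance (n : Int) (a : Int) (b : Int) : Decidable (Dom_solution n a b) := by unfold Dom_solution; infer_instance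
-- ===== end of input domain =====

-- B replaces A's 'floor-halve both positions until equal' loop by the closed form
-- bit_length((a-1) XOR (b-1)) — a direct bit computation, no loop (objective: idiomatic).

-- ===== PORT A =====
-- the while loop, with a fuel guard for totality only: inside Pre_/Dom the loop
-- meets within 64 iterations (positions have |·| ≤ 2^31), so the fuel never binds
def solLoop : Nat → Int → Int → Int → Int
  | 0, _, _, cnt => cnt
  | fuel + 1, a, b, cnt =>
    if a = b then cnt
    else solLoop fuel (PySem.Int.floordiv a 2) (PySem.Int.floordiv b 2) (cnt + 1)

def solution (n : Int) (a : Int) (b : Int) : Int := solLoop 64 (a - 1) (b - 1) 0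

-- ===== PORT B =====
def solution_alt (n : Int) (a : Int) (b : Int) : Int :=
  (PySem.Int.bitLength (PySem.Int.bxor (a - 1) (b - 1)) : Int)

-- ===== PRECONDITION & SPEC =====
-- Pre_ excludes the mixed-sign inputs (one of a,b ≥ 1, the other ≤ 0): there A's loop
-- never terminates (the two positions keep opposite signs forever), so A returns no value.
def Pre_solution (n : Int) (a : Int) (b : Int) : Prop := (1 ≤ a ∧ 1 ≤ b) ∨ (a ≤ 0 ∧ b ≤ 0)
instance (n : Int) (a : Int) (b : Int) : Decidable (Pre_solution n a b) := by unfold Pre_solution; infer_instance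
def pvWitness_solution : Int × Int × Int := (8, 4, 7)

def Spec_solution (n : Int) (a : Int) (b : Int) (out : Int) : Prop := out = solution_alt n a b
instance (n : Int) (a : Int) (b : Int) (out : Int) : Decidable (Spec_solution n a b out) := by unfold Spec_solution; infer_instance

-- ===== CLAIM (what is proved, stated in full; the proofs are below) =====
def Claim_equal_solution : Prop := ∀ (n : Int) (a : Int) (b : Int), Dom_solution n a b → Pre_solution n a b → Spec_solution n a b (solution n a b)

-- ===== LEMMAS AND PROOFS =====

lemma fdiv2_ofNat (u : Nat) : PySem.Int.floordiv (Int.ofNat u) 2 = Int.ofNat (u / 2) := by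
  exact_mod_cast PySem.Int.floordiv_natCast u 2

lemma fdiv2_negSucc (u : Nat) : PySem.Int.floordiv (Int.negSucc u) 2 = Int.negSucc (u / 2) := by
  rw [PySem.Int.floordiv_eq_iff_of_pos (by norm_num : (0:Int) < 2)]
  have h := Nat.div_add_mod u 2
  have h2 : u % 2 < 2 := Nat.mod_lt u (by norm_num)
  constructor <;> simp only [Int.negSucc_eq] <;> push_cast <;> omega

lemma xor_div2 (u v : Nat) : (u ^^^ v) / 2 = u / 2 ^^^ v / 2 := by
  rw [← Nat.shiftRight_one, ← Nat.shiftRight_one, ← Nat.shiftRight_one]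
  apply Nat.eq_of_testBit_eq
  intro i
  simp [Nat.testBit_shiftRight, Nat.testBit_xor]

lemma half_lt_pow (u : Nat) (f : Nat) (h : u < 2 ^ (f + 1)) : u / 2 < 2 ^ f := by
  have : 2 ^ (f + 1) = 2 ^ f * 2 := by ring
  omega

lemma bitLength_step (u v : Nat) (hne : u ≠ v) :
    PySem.Int.bitLength ((u ^^^ v : Nat) : Int)
      = PySem.Int.bitLength ((u / 2 ^^^ v / 2 : Nat) : Int) + 1 := by
  have hpos : 0 < u ^^^ v :=
    Nat.pos_of_ne_zero (fun h => hne (Nat.xor_eq_zero.mp h))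
  rw [PySem.Int.bitLength_natCast hpos, xor_div2]

lemma loop_ofNat (f : Nat) : ∀ (u v : Nat) (cnt : Int), u < 2 ^ f → v < 2 ^ f →
    solLoop f (Int.ofNat u) (Int.ofNat v) cnt
      = cnt + (PySem.Int.bitLength ((u ^^^ v : Nat) : Int) : Int) := by
  induction f with
  | zero =>
    intro u v cnt hu hv
    interval_cases u <;> interval_cases v
    simp [solLoop, PySem.Int.bitLength_zero]
  | succ f ih =>
    intro u v cnt hu hv
    by_cases huv : u = v
    · subst huv
      simp [solLoop, Nat.xor_self, PySem.Int.bitLength_zero]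
    · have hne : Int.ofNat u ≠ Int.ofNat v := by
        simpa [Int.ofNat_inj] using huv
      rw [solLoop, if_neg hne, fdiv2_ofNat, fdiv2_ofNat,
        ih (u / 2) (v / 2) (cnt + 1) (half_lt_pow u f hu) (half_lt_pow v f hv),
        bitLength_step u v huv]
      push_cast
      ring

lemma loop_negSucc (f : Nat) : ∀ (u v : Nat) (cnt : Int), u < 2 ^ f → v < 2 ^ f →
    solLoop f (Int.negSucc u) (Int.negSucc v) cnt
      = cnt + (PySem.Int.bitLength ((u ^^^ v : Nat) : Int) : Int) := by
  induction f with
  | zero =>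
    intro u v cnt hu hv
    interval_cases u <;> interval_cases v
    simp [solLoop, PySem.Int.bitLength_zero]
  | succ f ih =>
    intro u v cnt hu hv
    by_cases huv : u = v
    · subst huv
      simp [solLoop, Nat.xor_self, PySem.Int.bitLength_zero]
    · have hne : Int.negSucc u ≠ Int.negSucc v := by
        simpa [Int.negSucc_inj] using huv
      rw [solLoop, if_neg hne, fdiv2_negSucc, fdiv2_negSucc,
        ih (u / 2) (v / 2) (cnt + 1) (half_lt_pow u f hu) (half_lt_pow v f hv),
        bitLength_step u v huv]
      push_cast
      ring

lemma bxor_ofNat (u v : Nat) :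
    PySem.Int.bxor (Int.ofNat u) (Int.ofNat v) = ((u ^^^ v : Nat) : Int) := by
  exact_mod_cast PySem.Int.bxor_natCast u v

lemma bxor_negSucc (u v : Nat) :
    PySem.Int.bxor (Int.negSucc u) (Int.negSucc v) = ((u ^^^ v : Nat) : Int) := by
  have hu : ¬ (0 : Int) ≤ Int.negSucc u := by simp [Int.negSucc_eq]; omega
  have hv : ¬ (0 : Int) ≤ Int.negSucc v := by simp [Int.negSucc_eq]; omega
  have h1 : (-(Int.negSucc u) - 1).toNat = u := by simp [Int.negSucc_eq]
  have h2 : (-(Int.negSucc v) - 1).toNat = v := by simp [Int.negSucc_eq]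
  simp [PySem.Int.bxor, hu, hv, h1, h2]

-- ===== VERDICT (by name: the statement is the Claim_ definition above) =====
theorem solution_spec : Claim_equal_solution := by
  intro n a b hdom hpre
  unfold Spec_solution solution solution_alt
  have hb : -2147483648 ≤ a ∧ a ≤ 2147483648 ∧ -2147483648 ≤ b ∧ b ≤ 2147483648 := by
    unfold Dom_solution pvDomInt at hdom
    simp only [Bool.and_eq_true, decide_eq_true_eq] at hdom
    exact ⟨hdom.1.2.1, hdom.1.2.2, hdom.2.1, hdom.2.2⟩
  rcases hpre with ⟨ha, hb'⟩ | ⟨ha, hb'⟩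
  · -- both positions nonnegative
    obtain ⟨u, hu⟩ : ∃ u : Nat, a - 1 = Int.ofNat u := ⟨(a - 1).toNat, by simp; omega⟩
    obtain ⟨v, hv⟩ : ∃ v : Nat, b - 1 = Int.ofNat v := ⟨(b - 1).toNat, by simp; omega⟩
    have hub : u < 2 ^ 64 := by
      have : (u : Int) < 2 ^ 64 := by rw [← Int.ofNat_eq_natCast, ← hu]; norm_num; omega
      exact_mod_cast this
    have hvb : v < 2 ^ 64 := by
      have : (v : Int) < 2 ^ 64 := by rw [← Int.ofNat_eq_natCast, ← hv]; norm_num; omega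
      exact_mod_cast this
    rw [hu, hv, loop_ofNat 64 u v 0 hub hvb, bxor_ofNat]
    ring
  · -- both positions negative
    obtain ⟨u, hu⟩ : ∃ u : Nat, a - 1 = Int.negSucc u :=
      ⟨(-a).toNat, by simp [Int.negSucc_eq]; omega⟩
    obtain ⟨v, hv⟩ : ∃ v : Nat, b - 1 = Int.negSucc v :=
      ⟨(-b).toNat, by simp [Int.negSucc_eq]; omega⟩
    have hub : u < 2 ^ 64 := by
      have : -(u : Int) - 1 = a - 1 := by rw [hu, Int.negSucc_eq]; ring_nf
      omega
    have hvb : v < 2 ^ 64 := by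
      have : -(v : Int) - 1 = b - 1 := by rw [hv, Int.negSucc_eq]; ring_nf
      omega
    rw [hu, hv, loop_negSucc 64 u v 0 hub hvb, bxor_negSucc]
    ring
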